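-- pv_equiv track=rewrite | github.com/Ethara-Ai/pzprjs | games/kshitiz/play_tidepool.py | _build_moves
-- ===== SOURCE A (Python) =====
-- def _build_moves(shaded_grid, rows, cols):
--     moves_full = []
--     moves_required = []
--     moves_hint = []
--     for r in range(rows):
--         for c in range(cols):
--             x = 1 + c * 2
--             y = 1 + r * 2
--             if shaded_grid[r][c]:
--                 move = f"mouse,left,{x},{y}"
--                 moves_full.append(move)
--                 moves_required.append(move)
--             else:
--                 move = f"mouse,right,{x},{y}"
--                 moves_full.append(move)
--                 moves_hint.append(move)
--     return moves_full, moves_required, moves_hint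
-- ===== SOURCE B (Python) =====
-- def _build_moves(shaded_grid, rows, cols):
--     moves_full = []
--     for r in range(rows):
--         y = 1 + r * 2
--         for c in range(cols):
--             side = "left" if shaded_grid[r][c] else "right"
--             moves_full.append(f"mouse,{side},{1 + c * 2},{y}")
--     moves_required = [m for m in moves_full if m.startswith("mouse,left,")]
--     moves_hint = [m for m in moves_full if not m.startswith("mouse,left,")]
--     return moves_full, moves_required, moves_hint
-- ===== Notes on version B (the rewrite author's own statement) =====
-- stated objective: alternative
-- what changed: A fans one grid pass out into three accumulators; B builds only moves_full from the grid, then derives moves_required and moves_hint by partitioning the produced move strings on the 'mouse,left,' prefix, so the filtered lists never consult the grid.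
import Mathlib
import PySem

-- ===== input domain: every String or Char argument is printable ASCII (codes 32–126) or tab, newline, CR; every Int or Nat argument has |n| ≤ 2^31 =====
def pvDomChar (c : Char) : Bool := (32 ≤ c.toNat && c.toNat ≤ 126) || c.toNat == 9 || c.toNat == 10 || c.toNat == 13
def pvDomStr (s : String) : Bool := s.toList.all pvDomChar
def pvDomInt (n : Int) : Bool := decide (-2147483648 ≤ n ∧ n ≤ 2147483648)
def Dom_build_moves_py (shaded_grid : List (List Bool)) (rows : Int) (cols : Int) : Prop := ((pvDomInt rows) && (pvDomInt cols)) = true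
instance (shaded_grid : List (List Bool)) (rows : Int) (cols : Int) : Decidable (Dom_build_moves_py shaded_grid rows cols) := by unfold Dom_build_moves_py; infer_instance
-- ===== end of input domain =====

-- B builds only moves_full from the grid, then derives moves_required/moves_hint by
-- partitioning the produced strings on the "mouse,left," prefix; same cost, different data flow.


-- shaded_grid[r][c]; the `none` (IndexError) cases are excluded by Pre_build_moves_py,
-- there we default to `false` (both ports use this same access helper).
def pvCell (g : List (List Bool)) (r c : Int) : Bool :=
  (PySem.List.pyGet? ((PySem.List.pyGet? g r).getD []) c).getD false

-- ===== PORT A =====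
def pvLeft (x y : Int) : String :=
  "mouse,left," ++ PySem.Int.toStr x ++ "," ++ PySem.Int.toStr y

def pvRight (x y : Int) : String :=
  "mouse,right," ++ PySem.Int.toStr x ++ "," ++ PySem.Int.toStr y

-- literal transliteration: one nested loop threading the triple (full, required, hint)
def build_moves_py (shaded_grid : List (List Bool)) (rows : Int) (cols : Int) : List String × List String × List String :=
  (PySem.List.pyRange 0 rows 1).foldl (fun st r =>
    (PySem.List.pyRange 0 cols 1).foldl (fun st c =>
      let x := 1 + c * 2
      let y := 1 + r * 2
      if pvCell shaded_grid r c then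
        let move := pvLeft x y
        (st.1 ++ [move], st.2.1 ++ [move], st.2.2)
      else
        let move := pvRight x y
        (st.1 ++ [move], st.2.1, st.2.2 ++ [move])) st) ([], [], [])

-- ===== PORT B =====
-- f"mouse,{side},{x},{y}" from Source B
def pvMove (side : String) (x y : Int) : String :=
  "mouse," ++ side ++ "," ++ PySem.Int.toStr x ++ "," ++ PySem.Int.toStr y

-- literal transliteration of Source B: one single-accumulator pass building moves_full,
-- then two filters partitioning it on the "mouse,left," prefix
def build_moves_py_alt (shaded_grid : List (List Bool)) (rows : Int) (cols : Int) : List String × List String × List String :=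
  let moves_full :=
    (PySem.List.pyRange 0 rows 1).foldl (fun acc r =>
      let y := 1 + r * 2
      (PySem.List.pyRange 0 cols 1).foldl (fun acc c =>
        let side := if pvCell shaded_grid r c then "left" else "right"
        acc ++ [pvMove side (1 + c * 2) y]) acc) []
  let moves_required := moves_full.filter (fun m => PySem.Str.startswith m "mouse,left,")
  let moves_hint := moves_full.filter (fun m => !(PySem.Str.startswith m "mouse,left,"))
  (moves_full, moves_required, moves_hint)

-- ===== PRECONDITION & SPEC =====
-- Pre_ excludes exactly the inputs where the Python A raises IndexError
-- (some visited shaded_grid[r][c] is out of range); B raises there too.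
def Pre_build_moves_py (shaded_grid : List (List Bool)) (rows : Int) (cols : Int) : Prop :=
  cols ≤ 0 ∨ (rows ≤ (shaded_grid.length : Int) ∧
    ∀ row ∈ shaded_grid.take rows.toNat, cols ≤ (row.length : Int))
instance (shaded_grid : List (List Bool)) (rows : Int) (cols : Int) : Decidable (Pre_build_moves_py shaded_grid rows cols) := by unfold Pre_build_moves_py; infer_instance
def pvWitness_build_moves_py : List (List Bool) × Int × Int := ([[true, false], [false, true]], 2, 2)

def Spec_build_moves_py (shaded_grid : List (List Bool)) (rows : Int) (cols : Int) (out : List String × List String × List String) : Prop := out = build_moves_py_alt shaded_grid rows cols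
instance (shaded_grid : List (List Bool)) (rows : Int) (cols : Int) (out : List String × List String × List String) : Decidable (Spec_build_moves_py shaded_grid rows cols out) := by unfold Spec_build_moves_py; infer_instance

-- ===== CLAIM =====
def Claim_equal_build_moves_py : Prop := ∀ (shaded_grid : List (List Bool)) (rows : Int) (cols : Int), Dom_build_moves_py shaded_grid rows cols → Pre_build_moves_py shaded_grid rows cols → Spec_build_moves_py shaded_grid rows cols (build_moves_py shaded_grid rows cols)

-- ===== LEMMAS AND PROOFS =====

-- the move string each cell produces
def pvMk (g : List (List Bool)) (r c : Int) : String :=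
  if pvCell g r c then pvLeft (1 + c * 2) (1 + r * 2) else pvRight (1 + c * 2) (1 + r * 2)

def pvIsLeft (m : String) : Bool := PySem.Str.startswith m "mouse,left,"

theorem pvMove_left (x y : Int) : pvMove "left" x y = pvLeft x y := rfl

theorem pvMove_right (x y : Int) : pvMove "right" x y = pvRight x y := rfl

theorem pvIsLeft_left (x y : Int) : pvIsLeft (pvLeft x y) = true := by
  simp only [pvIsLeft, pvLeft, PySem.Str.startswith_eq]
  rw [PySem.Chars.startswith_iff]
  simp [String.toList_append]

theorem pvIsLeft_right (x y : Int) : pvIsLeft (pvRight x y) = false := by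
  simp only [pvIsLeft, pvRight, PySem.Str.startswith_eq]
  rw [Bool.eq_false_iff]
  intro h
  rw [PySem.Chars.startswith_iff] at h
  simp [String.toList_append] at h

-- A's inner fold over one row, for any list of column indices
theorem pv_inner (g : List (List Bool)) (r : Int) (l : List Int)
    (acc : List String × List String × List String) :
    l.foldl (fun st c =>
      let x := 1 + c * 2
      let y := 1 + r * 2
      if pvCell g r c then
        let move := pvLeft x y
        (st.1 ++ [move], st.2.1 ++ [move], st.2.2)
      else
        let move := pvRight x y
        (st.1 ++ [move], st.2.1, st.2.2 ++ [move])) acc =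
    (let ms := l.map (fun c => pvMk g r c)
     (acc.1 ++ ms, acc.2.1 ++ ms.filter pvIsLeft, acc.2.2 ++ ms.filter (fun m => !pvIsLeft m))) := by
  induction l generalizing acc with
  | nil => simp
  | cons c cs ih =>
    by_cases h : pvCell g r c = true <;>
      simp [List.foldl_cons, ih, pvMk, h,
        pvIsLeft_left, pvIsLeft_right, List.append_assoc]

-- A's whole nested fold, for any list of row indices
theorem pv_outer (g : List (List Bool)) (cols : Int) (l : List Int)
    (acc : List String × List String × List String) :
    l.foldl (fun st r =>
      (PySem.List.pyRange 0 cols 1).foldl (fun st c =>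
        let x := 1 + c * 2
        let y := 1 + r * 2
        if pvCell g r c then
          let move := pvLeft x y
          (st.1 ++ [move], st.2.1 ++ [move], st.2.2)
        else
          let move := pvRight x y
          (st.1 ++ [move], st.2.1, st.2.2 ++ [move])) st) acc =
    (let ms := l.flatMap (fun r => (PySem.List.pyRange 0 cols 1).map (fun c => pvMk g r c))
     (acc.1 ++ ms, acc.2.1 ++ ms.filter pvIsLeft, acc.2.2 ++ ms.filter (fun m => !pvIsLeft m))) := by
  induction l generalizing acc with
  | nil => simp
  | cons r rs ih =>
    rw [List.foldl_cons, pv_inner, ih]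
    simp [List.filter_append, List.append_assoc]

-- B's moves_full fold appends the same move strings
theorem pv_full (g : List (List Bool)) (cols : Int) (l : List Int) (acc : List String) :
    l.foldl (fun acc r =>
      let y := 1 + r * 2
      (PySem.List.pyRange 0 cols 1).foldl (fun acc c =>
        let side := if pvCell g r c then "left" else "right"
        acc ++ [pvMove side (1 + c * 2) y]) acc) acc =
    acc ++ l.flatMap (fun r => (PySem.List.pyRange 0 cols 1).map (fun c => pvMk g r c)) := by
  induction l generalizing acc with
  | nil => simp
  | cons r rs ih =>
    rw [List.foldl_cons]
    have inner : ∀ (cl : List Int) (a : List String),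
        cl.foldl (fun acc c =>
          let side := if pvCell g r c then "left" else "right"
          acc ++ [pvMove side (1 + c * 2) (1 + r * 2)]) a =
        a ++ cl.map (fun c => pvMk g r c) := by
      intro cl
      induction cl with
      | nil => simp
      | cons c cs ih2 =>
        intro a
        by_cases h : pvCell g r c = true <;>
          simp [List.foldl_cons, ih2, pvMk, h, pvMove_left, pvMove_right, List.append_assoc]
    rw [inner, ih]
    simp [List.append_assoc]

-- ===== VERDICT =====
theorem build_moves_py_spec : Claim_equal_build_moves_py := by
  intro g rows cols _ _
  unfold Spec_build_moves_py build_moves_py build_moves_py_alt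
  rw [pv_outer, pv_full]
  rfl
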